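-- pv_equiv track=rewrite | github.com/alvaroegi/DAA | main.py | containsNumber
-- ===== SOURCE A (Python) =====
-- def containsNumber(n,a):
--     if(n == a):
--         return True
--     elif(n % 10 == a):
--         return True
--     elif (n // 10 == 0):
--         return False
--     else:
--         return containsNumber(n // 10,a)
-- ===== SOURCE B (Python) =====
-- def containsNumber(n, a):
--     # a is "contained" in n when a is a decimal digit of n or a truncation n // 10**k.
--     if 0 <= a <= 9:
--         m = n
--         while m >= 10:
--             if m % 10 == a:
--                 return True
--             m //= 10
--         return m == a
--     if a < 10:
--         return False
--     m = n
--     while m > a: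
--         m //= 10
--     return m == a
-- ===== Notes on version B (the rewrite author's own statement) =====
-- stated objective: alternative
-- what changed: Instead of one recursion threading three comparisons, B splits by the query: for 0<=a<=9 it scans the digits of n with a loop, for a>=10 it truncates n by repeated //10 until it is <= a and compares once, and returns False for negative a; same O(log n) cost, no recursion.
-- outside the precondition, e.g. on containsNumber(-1, 9): A returns True, B returns False; on containsNumber(-3, 7): A returns True, B returns False; on containsNumber(-12, 0): A raises RecursionError, B returns False
import Mathlib
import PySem

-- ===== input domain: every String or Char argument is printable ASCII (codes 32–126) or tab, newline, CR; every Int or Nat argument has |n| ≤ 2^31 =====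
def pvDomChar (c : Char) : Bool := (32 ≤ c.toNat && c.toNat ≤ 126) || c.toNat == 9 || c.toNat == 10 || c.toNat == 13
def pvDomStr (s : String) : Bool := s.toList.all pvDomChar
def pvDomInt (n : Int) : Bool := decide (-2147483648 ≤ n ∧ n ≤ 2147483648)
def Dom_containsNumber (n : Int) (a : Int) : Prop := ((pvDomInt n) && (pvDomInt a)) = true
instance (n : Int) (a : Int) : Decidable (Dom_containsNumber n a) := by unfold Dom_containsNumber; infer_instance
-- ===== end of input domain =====

-- B replaces A's three-way recursion by a case split on a (digit scan / truncate-and-compare); same cost, no recursion; equivalence proved for n >= 0 (A = B on the return value).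


-- ===== PORT A =====
-- fuel makes the recursion total; n.natAbs + 1 steps always suffice for n ≥ 0 (the only inputs Pre_ admits)
def cnGo : Nat → Int → Int → Bool
  | 0, _, _ => false
  | fuel+1, n, a =>
    if n = a then true
    else if PySem.Int.mod n 10 = a then true
    else if PySem.Int.floordiv n 10 = 0 then false
    else cnGo fuel (PySem.Int.floordiv n 10) a

def containsNumber (n : Int) (a : Int) : Bool := cnGo (n.natAbs + 1) n a

-- ===== PORT B =====
-- the 'while m >= 10' digit-scan loop of B (fuel-bounded; n.natAbs + 1 suffices for n ≥ 0)
def cnDigits : Nat → Int → Int → Bool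
  | 0, m, a => decide (m = a)
  | fuel+1, m, a =>
    if m < 10 then decide (m = a)
    else if PySem.Int.mod m 10 = a then true
    else cnDigits fuel (PySem.Int.floordiv m 10) a

-- the 'while m > a' truncation loop of B
def cnTrunc : Nat → Int → Int → Bool
  | 0, m, a => decide (m = a)
  | fuel+1, m, a =>
    if a < m then cnTrunc fuel (PySem.Int.floordiv m 10) a
    else decide (m = a)

def containsNumber_alt (n : Int) (a : Int) : Bool :=
  if 0 ≤ a ∧ a ≤ 9 then cnDigits (n.natAbs + 1) n a
  else if a < 10 then false
  else cnTrunc (n.natAbs + 1) n a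

-- ===== PRECONDITION & SPEC =====
-- Pre_ excludes negative n: there A's recursion never reaches its 'n // 10 == 0' base case, so it
-- raises RecursionError except when a happens to equal an intermediate truncated value or a trailing
-- digit; those accidental True returns (e.g. (-1, 9)) are excluded together with the raising inputs.
def Pre_containsNumber (n : Int) (a : Int) : Prop := 0 ≤ n
instance (n : Int) (a : Int) : Decidable (Pre_containsNumber n a) := by unfold Pre_containsNumber; infer_instance
def pvWitness_containsNumber : Int × Int := (123, 2)

def Spec_containsNumber (n : Int) (a : Int) (out : Bool) : Prop := out = containsNumber_alt n a
instance (n : Int) (a : Int) (out : Bool) : Decidable (Spec_containsNumber n a out) := by unfold Spec_containsNumber; infer_instance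

-- ===== CLAIM (what is proved, stated in full; the proofs are below) =====
def Claim_equal_containsNumber : Prop := ∀ (n : Int) (a : Int), Dom_containsNumber n a → Pre_containsNumber n a → Spec_containsNumber n a (containsNumber n a)

-- ===== LEMMAS AND PROOFS =====

lemma cn_div10 (n : Int) : PySem.Int.floordiv n 10 = n / 10 :=
  PySem.Int.floordiv_eq_ediv_of_pos (by norm_num)

lemma cn_mod10 (n : Int) : PySem.Int.mod n 10 = n % 10 :=
  PySem.Int.mod_eq_emod_of_pos (by norm_num)

-- the digit-scan loop ignores the fuel as long as it exceeds |m|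
lemma cnDigits_fuel : ∀ (k : Nat) (m a : Int), 0 ≤ m → m.natAbs ≤ k →
    ∀ f g, m.natAbs < f → m.natAbs < g → cnDigits f m a = cnDigits g m a := by
  intro k
  induction k with
  | zero =>
    intro m a hm hk f g hf hg
    obtain ⟨f', rfl⟩ : ∃ f', f = f' + 1 := ⟨f - 1, by omega⟩
    obtain ⟨g', rfl⟩ : ∃ g', g = g' + 1 := ⟨g - 1, by omega⟩
    have : m = 0 := by omega
    simp [cnDigits, this]
  | succ k ih =>
    intro m a hm hk f g hf hg
    obtain ⟨f', rfl⟩ : ∃ f', f = f' + 1 := ⟨f - 1, by omega⟩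
    obtain ⟨g', rfl⟩ : ∃ g', g = g' + 1 := ⟨g - 1, by omega⟩
    by_cases h10 : m < 10
    · simp [cnDigits, h10]
    · simp only [cnDigits, if_neg h10, cn_mod10, cn_div10]
      by_cases hmod : m % 10 = a
      · simp [hmod]
      · simp only [if_neg hmod]
        exact ih (m / 10) a (by omega) (by omega) f' g' (by omega) (by omega)

-- so does the truncation loop, for the a ≥ 10 branch that calls it
lemma cnTrunc_fuel : ∀ (k : Nat) (m a : Int), 0 ≤ m → 10 ≤ a → m.natAbs ≤ k →
    ∀ f g, m.natAbs < f → m.natAbs < g → cnTrunc f m a = cnTrunc g m a := by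
  intro k
  induction k with
  | zero =>
    intro m a hm ha hk f g hf hg
    obtain ⟨f', rfl⟩ : ∃ f', f = f' + 1 := ⟨f - 1, by omega⟩
    obtain ⟨g', rfl⟩ : ∃ g', g = g' + 1 := ⟨g - 1, by omega⟩
    have : m = 0 := by omega
    simp [cnTrunc, this, show ¬ (a < 0) from by omega]
  | succ k ih =>
    intro m a hm ha hk f g hf hg
    obtain ⟨f', rfl⟩ : ∃ f', f = f' + 1 := ⟨f - 1, by omega⟩
    obtain ⟨g', rfl⟩ : ∃ g', g = g' + 1 := ⟨g - 1, by omega⟩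
    by_cases hlt : a < m
    · simp only [cnTrunc, if_pos hlt, cn_div10]
      exact ih (m / 10) a (by omega) ha (by omega) f' g' (by omega) (by omega)
    · simp [cnTrunc, hlt]

-- main invariant: with sufficient fuel, A's recursion computes B's case split, for every n ≥ 0
lemma cn_main : ∀ (k : Nat) (n a : Int), 0 ≤ n → n.natAbs ≤ k →
    ∀ f, n.natAbs < f → cnGo f n a = containsNumber_alt n a := by
  intro k
  induction k with
  | zero =>
    intro n a hn hk f hf
    obtain ⟨f', rfl⟩ : ∃ f', f = f' + 1 := ⟨f - 1, by omega⟩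
    have hn0 : n = 0 := by omega
    subst hn0
    simp only [cnGo, cn_mod10, cn_div10]
    norm_num [containsNumber_alt, cnDigits, cnTrunc]
    by_cases h : (0 : Int) = a
    · simp [← h]
    · simp [h]
  | succ k ih =>
    intro n a hn hk f hf
    obtain ⟨f', rfl⟩ : ∃ f', f = f' + 1 := ⟨f - 1, by omega⟩
    simp only [cnGo, cn_mod10, cn_div10]
    by_cases h10 : n < 10
    · -- base layer: n // 10 == 0, A returns (n == a) or (n % 10 == a), both equal to n = a here
      have hdiv : n / 10 = 0 := by omega
      have hmod : n % 10 = n := by omega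
      simp only [hdiv, hmod]
      unfold containsNumber_alt
      by_cases ha9 : 0 ≤ a ∧ a ≤ 9
      · simp [cnDigits, ha9, h10]
      · rw [if_neg ha9]
        by_cases ha10 : a < 10
        · have hne : ¬ n = a := by omega
          simp [ha10, hne]
        · have hne : ¬ n = a := by omega
          have hlt : ¬ a < n := by omega
          simp [ha10, cnTrunc, hne, hlt]
    · -- recursive layer: n ≥ 10
      have hne0 : ¬ n / 10 = 0 := by omega
      have hq : 0 ≤ n / 10 := by omega
      have hqlt : (n / 10).natAbs < n.natAbs := by omega
      have hrec : cnGo f' (n / 10) a = containsNumber_alt (n / 10) a :=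
        ih (n / 10) a hq (by omega) f' (by omega)
      rw [if_neg hne0]
      unfold containsNumber_alt at hrec ⊢
      by_cases ha9 : 0 ≤ a ∧ a ≤ 9
      · -- digit branch: n ≠ a (a ≤ 9 < n); B's loop peels the same digit test
        have hne : ¬ n = a := by omega
        rw [if_pos ha9] at hrec ⊢
        rw [if_neg hne]
        have : cnDigits (n.natAbs + 1) n a
            = if n % 10 = a then true else cnDigits n.natAbs (n / 10) a := by
          simp [cnDigits, h10]
        rw [this]
        by_cases hmod : n % 10 = a
        · simp [hmod]
        · rw [if_neg hmod, if_neg hmod, hrec]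
          exact cnDigits_fuel (n / 10).natAbs (n / 10) a hq le_rfl _ _ (by omega) (by omega)
      · rw [if_neg ha9] at hrec ⊢
        by_cases ha10 : a < 10
        · -- a < 0: every compared value is ≥ 0, both sides false
          have hne : ¬ n = a := by omega
          have hmod : ¬ n % 10 = a := by omega
          rw [if_pos ha10] at hrec ⊢
          simp [hne, hmod, hrec]
        · -- a ≥ 10: B's truncation loop either steps (a < n) or stops with m = n ≤ a
          have ha : 10 ≤ a := by omega
          rw [if_neg ha10] at hrec ⊢
          have hmod : ¬ n % 10 = a := by omega
          rw [if_neg hmod]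
          by_cases hlt : a < n
          · have hne : ¬ n = a := by omega
            rw [if_neg hne]
            have : cnTrunc (n.natAbs + 1) n a = cnTrunc n.natAbs (n / 10) a := by
              simp [cnTrunc, hlt]
            rw [this, hrec]
            exact cnTrunc_fuel (n / 10).natAbs (n / 10) a hq ha le_rfl _ _ (by omega) (by omega)
          · -- n ≤ a: B returns (n = a); A's recursive result is false since n/10 < n ≤ a and n/10 ≠ a
            have hstop : cnTrunc (n.natAbs + 1) n a = decide (n = a) := by
              simp [cnTrunc, hlt]
            rw [hstop]
            have hqa : ¬ a < n / 10 := by omega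
            have hqne : ¬ n / 10 = a := by omega
            have : cnTrunc ((n / 10).natAbs + 1) (n / 10) a = false := by
              simp [cnTrunc, hqa, hqne]
            rw [hrec, this]
            by_cases h : n = a <;> simp [h]

-- ===== VERDICT (by name: the statement is the Claim_ definition above) =====
theorem containsNumber_spec : Claim_equal_containsNumber := by
  intro n a _ hpre
  unfold Spec_containsNumber containsNumber
  exact cn_main n.natAbs n a hpre le_rfl _ (by omega)
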